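-- pv_equiv track=rewrite | github.com/pypi-data/pypi-mirror-348 | packages/agh-vqis/agh_vqis-3.4.5-py3-none-any.whl/agh_vqis/utils/helpers.py | get_selected_vqis
-- ===== SOURCE A (Python) =====
-- class VQIs:
--     blockiness = 'blockiness'
--     SA = 'SA'
--     letterbox = 'letterbox'
--     pillarbox = 'pillarbox'
--     blockloss = 'blockloss'
--     blur = 'blur'
--     TA = 'TA'
--     blackout = 'blackout'
--     freezing = 'freezing'
--     exposure = 'exposure'
--     contrast = 'contrast'
--     interlace = 'interlace'
--     noise = 'noise'
--     slice = 'slice'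
--     flickering = 'flickering'
--     colourfulness = 'colourfulness'
--     blur_amount = 'blur_amount'
--     ugc = 'ugc'
--
-- def get_selected_vqis(options: dict) -> int:
--     vqis_weights = {
--         VQIs.blockiness: 1,
--         VQIs.SA: 2,
--         VQIs.letterbox: 4,
--         VQIs.pillarbox: 8,
--         VQIs.blockloss: 16,
--         VQIs.blur: 32,
--         VQIs.TA: 64,
--         VQIs.blackout: 128,
--         VQIs.freezing: 256,
--         VQIs.exposure: 512,
--         VQIs.contrast: 1024,
--         VQIs.interlace: 2048,
--         VQIs.noise: 4096,
--         VQIs.slice: 8192,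
--         VQIs.flickering: 16384
--     }
--
--     selected_vqis = 32767  # select all by default
--
--     for key, value in options.items():
--         if not value:
--             try:
--                 selected_vqis -= vqis_weights[key]  # remove vqis
--             except KeyError:
--                 pass
--
--     return selected_vqis
-- ===== SOURCE B (Python) =====
-- def get_selected_vqis(options: dict) -> int:
--     names = ['blockiness', 'SA', 'letterbox', 'pillarbox', 'blockloss',
--              'blur', 'TA', 'blackout', 'freezing', 'exposure',
--              'contrast', 'interlace', 'noise', 'slice', 'flickering']
--     deselected = {key for key, value in options.items() if not value}
--     mask = 0
--     for i, name in enumerate(names):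
--         if name not in deselected:
--             mask += 1 << i
--     return mask
-- ===== Notes on version B (the rewrite author's own statement) =====
-- stated objective: alternative
-- what changed: B first collects the set of falsy option keys in one comprehension, then builds the mask from zero over enumerate of the fixed metric-name list with 1<<i per bit, instead of A's single subtractive loop over the caller's options starting at 32767 with a weight dict and try/except KeyError; Pre_ excludes association lists with duplicate keys, which do not represent any Python dict.
import Mathlib
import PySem

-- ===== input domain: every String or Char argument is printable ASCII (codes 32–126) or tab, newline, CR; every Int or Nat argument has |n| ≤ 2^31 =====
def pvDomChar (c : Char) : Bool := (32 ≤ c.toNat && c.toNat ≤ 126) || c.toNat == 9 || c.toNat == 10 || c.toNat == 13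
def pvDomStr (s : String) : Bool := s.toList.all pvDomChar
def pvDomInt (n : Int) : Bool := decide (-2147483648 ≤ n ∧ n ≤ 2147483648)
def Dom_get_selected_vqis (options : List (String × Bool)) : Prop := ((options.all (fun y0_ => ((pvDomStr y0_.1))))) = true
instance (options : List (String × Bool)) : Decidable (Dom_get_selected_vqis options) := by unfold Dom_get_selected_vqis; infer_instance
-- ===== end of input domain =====

-- B collects the set of falsy option keys once, then assembles the mask from zero over
-- enumerate of the fixed metric-name list with 1 << i per bit, instead of A's subtractive
-- loop over the caller's options with a weight dict and try/except KeyError (alternative decomposition).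

-- ===== PORT A =====
-- the vqis_weights dict literal of A (association list in insertion order)
def pvWeightsA : List (String × Int) :=
  [("blockiness", 1), ("SA", 2), ("letterbox", 4), ("pillarbox", 8), ("blockloss", 16),
   ("blur", 32), ("TA", 64), ("blackout", 128), ("freezing", 256), ("exposure", 512),
   ("contrast", 1024), ("interlace", 2048), ("noise", 4096), ("slice", 8192), ("flickering", 16384)]

def get_selected_vqis (options : List (String × Bool)) : Int :=
  -- selected_vqis = 32767; for key, value in options.items(): if not value: try subtract weights[key] except KeyError: pass
  options.foldl (fun selected_vqis kv =>
    if kv.2 = false then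
      match List.lookup kv.1 pvWeightsA with
      | some w => selected_vqis - w   -- key present: subtract
      | none => selected_vqis         -- KeyError swallowed
    else selected_vqis) 32767

-- ===== PORT B =====
-- the names list of B
def pvNames : List String :=
  ["blockiness", "SA", "letterbox", "pillarbox", "blockloss",
   "blur", "TA", "blackout", "freezing", "exposure",
   "contrast", "interlace", "noise", "slice", "flickering"]

def get_selected_vqis_alt (options : List (String × Bool)) : Int :=
  -- deselected = {key for key, value in options.items() if not value}
  let deselected : PySem.Set String :=
    PySem.Set.ofList ((options.filter (fun kv => kv.2 == false)).map Prod.fst)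
  -- mask = 0; for i, name in enumerate(names): if name not in deselected: mask += 1 << i
  (PySem.List.enumerate pvNames 0).foldl
    (fun mask p => if PySem.Set.contains deselected p.2 then mask
                   else mask + ((1 : Int) <<< (p.1.toNat : Int))) 0

-- ===== PRECONDITION & SPEC =====
-- Pre_ excludes association lists with duplicate keys: a Python dict cannot contain them, so
-- they represent no input of the Python programs; A's per-occurrence subtraction there would
-- be an artefact of the association-list encoding only.
def Pre_get_selected_vqis (options : List (String × Bool)) : Prop :=
  (options.map Prod.fst).Nodup
instance (options : List (String × Bool)) : Decidable (Pre_get_selected_vqis options) := by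
  unfold Pre_get_selected_vqis; infer_instance

def pvWitness_get_selected_vqis : (List (String × Bool)) := [("blur", false), ("noise", true)]

def Spec_get_selected_vqis (options : List (String × Bool)) (out : Int) : Prop := out = get_selected_vqis_alt options
instance (options : List (String × Bool)) (out : Int) : Decidable (Spec_get_selected_vqis options out) := by unfold Spec_get_selected_vqis; infer_instance

-- ===== CLAIM (what is proved, stated in full; the proofs are below) =====
def Claim_equal_get_selected_vqis : Prop := ∀ (options : List (String × Bool)), Dom_get_selected_vqis options → Pre_get_selected_vqis options → Spec_get_selected_vqis options (get_selected_vqis options)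

-- ===== LEMMAS AND PROOFS =====

-- total weight A subtracts: per falsy entry of options, the table weight of its key (0 if absent)
def pvPen : List (String × Bool) → Int
  | [] => 0
  | (k, v) :: rest => (if v = false then (List.lookup k pvWeightsA).getD 0 else 0) + pvPen rest

-- sum over a weight table t of the weights whose key's first match in opts is not false
def pvSumB (opts : List (String × Bool)) : List (String × Int) → Int
  | [] => 0
  | (k, w) :: t => (if (List.lookup k opts).getD true then w else 0) + pvSumB opts t

-- sum of the weights of entries of t whose key is exactly k
def pvWsum (k : String) : List (String × Int) → Int
  | [] => 0
  | (k', w) :: t => (if k' = k then w else 0) + pvWsum k t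

-- B's deselected set, named for the proofs (definitionally the let-binding inside the port)
def pvDsel (opts : List (String × Bool)) : PySem.Set String :=
  PySem.Set.ofList ((opts.filter (fun kv => kv.2 == false)).map Prod.fst)

-- sum B accumulates over an enumerated tail: 1 <<< i per name not in the deselected set
def pvSumE (dsel : PySem.Set String) : List (Int × String) → Int
  | [] => 0
  | p :: t => (if PySem.Set.contains dsel p.2 then 0 else (1 : Int) <<< (p.1.toNat : Int)) + pvSumE dsel t

theorem pvA_foldl (opts : List (String × Bool)) : ∀ acc : Int,
    opts.foldl (fun selected_vqis kv =>
      if kv.2 = false then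
        match List.lookup kv.1 pvWeightsA with
        | some w => selected_vqis - w
        | none => selected_vqis
      else selected_vqis) acc = acc - pvPen opts := by
  induction opts with
  | nil => intro acc; simp [pvPen]
  | cons kv rest ih =>
    intro acc
    obtain ⟨k, v⟩ := kv
    simp only [List.foldl_cons, pvPen, ih]
    cases h : List.lookup k pvWeightsA <;> cases v <;> simp [h] <;> ring

theorem pvB_foldl (dsel : PySem.Set String) (L : List (Int × String)) : ∀ acc : Int,
    L.foldl (fun mask p => if PySem.Set.contains dsel p.2 then mask
                           else mask + ((1 : Int) <<< (p.1.toNat : Int))) acc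
      = acc + pvSumE dsel L := by
  induction L with
  | nil => intro acc; simp [pvSumE]
  | cons p t ih =>
    intro acc
    simp only [List.foldl_cons, pvSumE, ih]
    by_cases h : PySem.Set.contains dsel p.2 = true
    · rw [if_pos h, if_pos h]; ring
    · rw [if_neg h, if_neg h]; ring

theorem pvLookup_mem (opts : List (String × Bool)) (hn : (opts.map Prod.fst).Nodup) (k : String) :
    List.lookup k opts = some false ↔ (k, false) ∈ opts := by
  induction opts with
  | nil => simp
  | cons kv rest ih =>
    obtain ⟨k', v⟩ := kv
    simp only [List.map_cons, List.nodup_cons] at hn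
    by_cases h : k = k'
    · subst h
      have : (k, false) ∉ rest := fun hm => hn.1 (List.mem_map.mpr ⟨(k, false), hm, rfl⟩)
      cases v <;> simp [List.lookup, this]
    · simp [List.lookup, beq_false_of_ne h, ih hn.2, h]

theorem pvContains (opts : List (String × Bool)) (hn : (opts.map Prod.fst).Nodup) (k : String) :
    PySem.Set.contains (pvDsel opts) k = true ↔ List.lookup k opts = some false := by
  have h1 : PySem.Set.contains (pvDsel opts) k = true ↔ k ∈ pvDsel opts := by
    simp [PySem.Set.contains]
  rw [h1, pvDsel, PySem.Set.mem_ofList, pvLookup_mem opts hn k]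
  constructor
  · intro hm
    obtain ⟨⟨k', v⟩, hmem, hfst⟩ := List.mem_map.mp hm
    obtain ⟨hmem', hv⟩ := List.mem_filter.mp hmem
    have hv' : v = false := by simpa using hv
    have hk' : k' = k := hfst
    subst hv'; subst hk'
    exact hmem'
  · intro hm
    exact List.mem_map.mpr ⟨(k, false), List.mem_filter.mpr ⟨hm, by simp⟩, rfl⟩

theorem pvSumE_eq (opts : List (String × Bool)) (hn : (opts.map Prod.fst).Nodup) :
    ∀ L : List (Int × String),
    pvSumE (pvDsel opts) L = pvSumB opts (L.map fun p => (p.2, (1 : Int) <<< (p.1.toNat : Int))) := by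
  intro L
  induction L with
  | nil => simp [pvSumE, pvSumB]
  | cons p t ih =>
    simp only [pvSumE, List.map_cons, pvSumB, ih]
    congr 1
    by_cases hl : List.lookup p.2 opts = some false
    · rw [if_pos ((pvContains opts hn p.2).mpr hl), hl]
      rfl
    · have hc : ¬ PySem.Set.contains (pvDsel opts) p.2 = true :=
        fun h => hl ((pvContains opts hn p.2).mp h)
      rw [if_neg hc]
      cases h : List.lookup p.2 opts with
      | none => rfl
      | some b => cases b with
        | false => exact absurd h hl
        | true => rfl

-- the enumerated names with their bit weights are exactly A's weight table
theorem pvTable :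
    ((PySem.List.enumerate pvNames 0).map fun p => (p.2, (1 : Int) <<< (p.1.toNat : Int))) = pvWeightsA := by
  decide

theorem pvWsum_eq_zero (k : String) (t : List (String × Int)) (h : k ∉ t.map Prod.fst) :
    pvWsum k t = 0 := by
  induction t with
  | nil => rfl
  | cons kw t ih =>
    obtain ⟨k', w⟩ := kw
    simp only [List.map_cons, List.mem_cons] at h
    push_neg at h
    simp [pvWsum, Ne.symm h.1, ih h.2]

theorem pvLookup_eq_wsum (t : List (String × Int)) (hn : (t.map Prod.fst).Nodup) (k : String) :
    (List.lookup k t).getD 0 = pvWsum k t := by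
  induction t with
  | nil => rfl
  | cons kw t ih =>
    obtain ⟨k', w⟩ := kw
    simp only [List.map_cons, List.nodup_cons] at hn
    by_cases h : k = k'
    · subst h
      simp [List.lookup, pvWsum, pvWsum_eq_zero k t hn.1]
    · simp [List.lookup, pvWsum, beq_false_of_ne h, Ne.symm h, ih hn.2]

theorem pvLookup_eq_none {β : Type} (k : String) (l : List (String × β)) (h : k ∉ l.map Prod.fst) :
    List.lookup k l = none := by
  induction l with
  | nil => rfl
  | cons kv l ih =>
    obtain ⟨k', v⟩ := kv
    simp only [List.map_cons, List.mem_cons] at h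
    push_neg at h
    simp [List.lookup, beq_false_of_ne h.1, ih h.2]

theorem pvSumB_cons (k : String) (v : Bool) (rest : List (String × Bool))
    (hk : List.lookup k rest = none) : ∀ t : List (String × Int),
    pvSumB ((k, v) :: rest) t = pvSumB rest t - (if v = false then pvWsum k t else 0) := by
  intro t
  induction t with
  | nil => cases v <;> simp [pvSumB, pvWsum]
  | cons kw t ih =>
    obtain ⟨k', w⟩ := kw
    by_cases h : k' = k
    · subst h
      simp only [pvSumB, pvWsum, List.lookup, beq_self_eq_true, if_pos rfl, hk, ih]
      cases v <;> simp <;> ring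
    · simp only [pvSumB, pvWsum, List.lookup, beq_false_of_ne h, if_neg h, ih]
      cases v <;> simp <;> ring

theorem pvMain (opts : List (String × Bool)) (hn : (opts.map Prod.fst).Nodup) :
    (32767 : Int) - pvPen opts = pvSumB opts pvWeightsA := by
  induction opts with
  | nil => decide
  | cons kv rest ih =>
    obtain ⟨k, v⟩ := kv
    simp only [List.map_cons, List.nodup_cons] at hn
    rw [pvSumB_cons k v rest (pvLookup_eq_none k rest hn.1) pvWeightsA, ← ih hn.2]
    have hw : (List.lookup k pvWeightsA).getD 0 = pvWsum k pvWeightsA := by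
      have hnod : (pvWeightsA.map Prod.fst).Nodup := by decide
      exact pvLookup_eq_wsum pvWeightsA hnod k
    simp only [pvPen, hw]
    cases v <;> simp <;> ring

-- ===== VERDICT (by name: the statement is the Claim_ definition above) =====
theorem get_selected_vqis_spec : Claim_equal_get_selected_vqis := by
  intro options _ hpre
  unfold Spec_get_selected_vqis get_selected_vqis get_selected_vqis_alt
  rw [pvA_foldl]
  rw [show PySem.Set.ofList ((options.filter (fun kv => kv.2 == false)).map Prod.fst) = pvDsel options from rfl]
  rw [pvB_foldl, pvSumE_eq options hpre, pvTable, ← pvMain options hpre]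
  ring
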